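-- pv_equiv track=rewrite | github.com/RuneweaverStudios/overclaw | scripts/overclaw_gateway.py | _lead_for_agent
-- ===== SOURCE A (Python) =====
-- def _lead_for_agent(agent_name: str) -> str:
--     """Return the lead to notify for this agent. Workers: lead-{suffix}; lead zombie: orchestrator."""
--     if not agent_name:
--         return "orchestrator"
--     if agent_name.startswith("lead-"):
--         return "orchestrator"
--     for prefix in ("scout-", "builder-", "reviewer-"):
--         if agent_name.startswith(prefix):
--             suffix = agent_name[len(prefix):]
--             return f"lead-{suffix}"
--     return "orchestrator"
-- ===== SOURCE B (Python) =====
-- def _lead_for_agent(agent_name: str) -> str: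
--     """Return the lead to notify for this agent. Workers: lead-{suffix}; lead zombie: orchestrator."""
--     head, sep, rest = agent_name.partition("-")
--     if sep == "-" and head in {"scout", "builder", "reviewer"}:
--         return f"lead-{rest}"
--     return "orchestrator"
-- ===== Notes on version B (the rewrite author's own statement) =====
-- stated objective: simpler
-- what changed: B parses the name once with str.partition and does a single membership test on the head, instead of A's early-return chain of startswith checks plus a loop of startswith/slice over three prefixes.
import Mathlib
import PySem

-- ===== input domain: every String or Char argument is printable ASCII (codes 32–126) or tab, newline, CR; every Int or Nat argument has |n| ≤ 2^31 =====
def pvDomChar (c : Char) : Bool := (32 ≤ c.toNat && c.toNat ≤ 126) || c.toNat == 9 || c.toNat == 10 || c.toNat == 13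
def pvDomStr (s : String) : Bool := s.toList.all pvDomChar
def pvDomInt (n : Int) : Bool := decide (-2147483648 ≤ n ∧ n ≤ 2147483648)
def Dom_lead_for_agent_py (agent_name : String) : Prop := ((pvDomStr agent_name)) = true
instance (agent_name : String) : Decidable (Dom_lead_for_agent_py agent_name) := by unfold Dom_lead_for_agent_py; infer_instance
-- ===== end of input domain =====

-- B replaces A's startswith chain and prefix loop with one str.partition and a single
-- membership test on the head (objective: simpler).

-- ===== PORT A =====
-- the 'for prefix in (...)' loop of A, as structural recursion over the prefix tuple
def leadLoopA (agent_name : String) : List String → String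
  | [] => "orchestrator"
  | p :: ps =>
    if PySem.Str.startswith agent_name p then
      "lead-" ++ PySem.Str.slice agent_name (some (PySem.Str.len p)) none
    else leadLoopA agent_name ps

def lead_for_agent_py (agent_name : String) : String :=
  if agent_name = "" then "orchestrator"
  else if PySem.Str.startswith agent_name "lead-" then "orchestrator"
  else leadLoopA agent_name ["scout-", "builder-", "reviewer-"]

-- ===== PORT B =====
-- agent_name.partition('-') on code points: (head, found-a-dash?, rest)
def partitionDash : List Char → List Char × Bool × List Char
  | [] => ([], false, [])
  | c :: cs =>
    if c = '-' then ([], true, cs)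
    else
      let r := partitionDash cs
      (c :: r.1, r.2.1, r.2.2)

def lead_for_agent_py_alt (agent_name : String) : String :=
  let p := partitionDash agent_name.toList
  if p.2.1 && (p.1 == "scout".toList || p.1 == "builder".toList || p.1 == "reviewer".toList) then
    "lead-" ++ String.ofList p.2.2
  else "orchestrator"

-- ===== PRECONDITION & SPEC =====
def Spec_lead_for_agent_py (agent_name : String) (out : String) : Prop := out = lead_for_agent_py_alt agent_name
instance (agent_name : String) (out : String) : Decidable (Spec_lead_for_agent_py agent_name out) := by unfold Spec_lead_for_agent_py; infer_instance

-- ===== CLAIM (what is proved, stated in full; the proofs are below) =====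
def Claim_equal_lead_for_agent_py : Prop := ∀ (agent_name : String), Dom_lead_for_agent_py agent_name → Spec_lead_for_agent_py agent_name (lead_for_agent_py agent_name)

-- ===== LEMMAS AND PROOFS =====

-- structure of partitionDash: dash found ⇒ split at the first '-'
theorem pd_true {cs h r : List Char} (e : partitionDash cs = (h, true, r)) :
    cs = h ++ '-' :: r ∧ '-' ∉ h := by
  induction cs generalizing h r with
  | nil => simp [partitionDash] at e
  | cons c cs ih =>
    by_cases hc : c = '-'
    · subst hc
      simp [partitionDash] at e
      simp [e.1, e.2]
    · simp only [partitionDash, if_neg hc, Prod.mk.injEq] at e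
      obtain ⟨e1, e2, e3⟩ := e
      have : partitionDash cs = ((partitionDash cs).1, true, r) := by
        rw [← e2, ← e3]
      obtain ⟨f1, f2⟩ := ih this
      subst e1
      refine ⟨?_, ?_⟩
      · show c :: cs = c :: ((partitionDash cs).1 ++ '-' :: r)
        exact congrArg _ f1
      · simp [Ne.symm hc, f2]

-- no dash found ⇒ the whole string is the head and it has no dash
theorem pd_false {cs h r : List Char} (e : partitionDash cs = (h, false, r)) :
    cs = h ∧ '-' ∉ cs := by
  induction cs generalizing h r with
  | nil => simp only [partitionDash, Prod.mk.injEq] at e; simp [← e.1]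
  | cons c cs ih =>
    by_cases hc : c = '-'
    · subst hc; simp [partitionDash] at e
    · simp only [partitionDash, if_neg hc, Prod.mk.injEq] at e
      obtain ⟨e1, e2, e3⟩ := e
      have : partitionDash cs = ((partitionDash cs).1, false, (partitionDash cs).2.2) := by
        rw [← e2]
      obtain ⟨f1, f2⟩ := ih this
      subst e1
      exact ⟨congrArg _ f1, by simp [Ne.symm hc, f2]⟩

-- "w-" is a prefix of "h-r" (first dash right after h) iff w = h
theorem prefix_dash_iff {w h r : List Char} (hw : '-' ∉ w) (hh : '-' ∉ h) :
    (w ++ ['-']) <+: (h ++ '-' :: r) ↔ w = h := by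
  induction w generalizing h with
  | nil =>
    cases h with
    | nil => simp
    | cons a h' =>
      simp only [List.nil_append]
      constructor
      · intro hp
        rcases hp with ⟨t, ht⟩
        simp at ht
        exact absurd (show ('-' : Char) ∈ a :: h' by rw [← ht.1]; simp) hh
      · intro e; exact absurd e.symm (by simp)
  | cons a w' ih =>
    have ha : a ≠ '-' := fun e => hw (by simp [e])
    cases h with
    | nil =>
      simp only [List.nil_append]
      constructor
      · intro hp
        rcases hp with ⟨t, ht⟩
        simp at ht
        exact absurd ht.1 ha
      · intro e; simp at e
    | cons b h' =>
      have hh' : '-' ∉ h' := fun e => hh (by simp [e])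
      have hw' : '-' ∉ w' := fun e => hw (by simp [e])
      constructor
      · intro hp
        rcases hp with ⟨t, ht⟩
        simp at ht
        obtain ⟨e1, e2⟩ := ht
        have : (w' ++ ['-']) <+: (h' ++ '-' :: r) := ⟨t, by simpa using e2⟩
        rw [e1, (ih hw' hh').mp this]
      · intro e
        injection e with e1 e2
        subst e1; subst e2
        exact ⟨r, by simp⟩

-- if cs has no dash, no "w-" is a prefix of cs
theorem not_prefix_of_no_dash {w cs : List Char} (hcs : '-' ∉ cs) :
    ¬ (w ++ ['-']) <+: cs := by
  intro hp
  exact hcs (hp.subset (by simp))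

-- startswith for port A, via the PySem bridge
theorem startswith_iff_str (s p : String) :
    PySem.Str.startswith s p = true ↔ p.toList <+: s.toList := by
  rw [PySem.Str.startswith_eq]; exact PySem.Chars.startswith_iff _ _

theorem slice_toList (s : String) (n : Nat) :
    (PySem.Str.slice s (some (n : Int)) none).toList = s.toList.drop n := by
  rw [PySem.Str.toList_slice, PySem.Chars.slice_eq_listSlice, PySem.List.slice_from_natCast]

theorem string_ext {s t : String} (h : s.toList = t.toList) : s = t := by
  have := congrArg String.ofList h
  simpa using this

-- ===== VERDICT (by name: the statement is the Claim_ definition above) =====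
theorem lead_for_agent_py_spec : Claim_equal_lead_for_agent_py := by
  intro s _
  unfold Spec_lead_for_agent_py lead_for_agent_py lead_for_agent_py_alt
  rcases e : partitionDash s.toList with ⟨h, sep, r⟩
  cases sep with
  | false =>
    obtain ⟨e1, e2⟩ := pd_false e
    have nolead : PySem.Str.startswith s "lead-" = false := by
      rw [Bool.eq_false_iff]
      intro hsw
      exact not_prefix_of_no_dash (w := "lead".toList) e2
        (by simpa using (startswith_iff_str s "lead-").mp hsw)
    have n1 : PySem.Str.startswith s "scout-" = false := by
      rw [Bool.eq_false_iff]
      intro hsw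
      exact not_prefix_of_no_dash (w := "scout".toList) e2
        (by simpa using (startswith_iff_str s _).mp hsw)
    have n2 : PySem.Str.startswith s "builder-" = false := by
      rw [Bool.eq_false_iff]
      intro hsw
      exact not_prefix_of_no_dash (w := "builder".toList) e2
        (by simpa using (startswith_iff_str s _).mp hsw)
    have n3 : PySem.Str.startswith s "reviewer-" = false := by
      rw [Bool.eq_false_iff]
      intro hsw
      exact not_prefix_of_no_dash (w := "reviewer".toList) e2
        (by simpa using (startswith_iff_str s _).mp hsw)
    simp only [PySem.Str.startswith_eq] at nolead n1 n2 n3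
    simp at nolead n1 n2 n3
    by_cases hs : s = "" <;>
      simp [hs, nolead, n1, n2, n3, leadLoopA]
  | true =>
    obtain ⟨e1, e2⟩ := pd_true e
    have hne : ¬ s = "" := by
      intro hs
      rw [hs] at e1
      simp at e1
    have sw : ∀ w : List Char, '-' ∉ w →
        ((w ++ ['-']) <+: s.toList ↔ w = h) := by
      intro w hw
      rw [e1]; exact prefix_dash_iff hw e2
    have swstr : ∀ p w : String, p.toList = w.toList ++ ['-'] → '-' ∉ w.toList →
        (PySem.Str.startswith s p = (w.toList == h)) := by
      intro p w hp hw
      by_cases hc : w.toList = h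
      · simp only [beq_iff_eq.mpr hc]
        rw [startswith_iff_str, hp]
        exact (sw _ hw).mpr hc
      · simp only [beq_eq_false_iff_ne.mpr hc]
        rw [Bool.eq_false_iff]
        intro hsw
        rw [startswith_iff_str, hp, sw _ hw] at hsw
        exact hc hsw
    have hdrop : ∀ n : Nat, n = h.length + 1 → s.toList.drop n = r := by
      intro n hn
      rw [e1, hn]
      simp
    simp only [if_neg hne]
    by_cases hlead : "lead".toList = h
    · have t0 : PySem.Str.startswith s "lead-" = true := by
        rw [swstr "lead-" "lead" (by decide) (by decide)]; simp [hlead]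
      have hb : (h == "scout".toList || h == "builder".toList || h == "reviewer".toList) = false := by
        rw [← hlead]; decide
      simp only [t0, if_true, hb]
      simp
    · have nolead : PySem.Str.startswith s "lead-" = false := by
        rw [swstr "lead-" "lead" (by decide) (by decide)]
        exact beq_eq_false_iff_ne.mpr hlead
      by_cases h1 : "scout".toList = h
      · have t1 : PySem.Str.startswith s "scout-" = true := by
          rw [swstr "scout-" "scout" (by decide) (by decide)]; simp [h1]
        have hb : (h == "scout".toList || h == "builder".toList || h == "reviewer".toList) = true := by
          simp [← h1]
        simp only [nolead, Bool.false_eq_true, if_false, leadLoopA, t1, if_true, hb,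
          Bool.true_and]
        apply string_ext
        simp only [String.toList_append]
        have hlen : PySem.Str.len "scout-" = ((6 : Nat) : Int) := by decide
        rw [hlen, slice_toList, hdrop 6 (by rw [← h1]; decide)]
        simp
      · have n1 : PySem.Str.startswith s "scout-" = false := by
          rw [swstr "scout-" "scout" (by decide) (by decide)]
          exact beq_eq_false_iff_ne.mpr h1
        by_cases h2 : "builder".toList = h
        · have t2 : PySem.Str.startswith s "builder-" = true := by
            rw [swstr "builder-" "builder" (by decide) (by decide)]; simp [h2]
          have hb : (h == "scout".toList || h == "builder".toList || h == "reviewer".toList) = true := by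
            simp [← h2]
          simp only [nolead, Bool.false_eq_true, if_false, leadLoopA, n1, t2, if_true, hb,
            Bool.true_and]
          apply string_ext
          simp only [String.toList_append]
          have hlen : PySem.Str.len "builder-" = ((8 : Nat) : Int) := by decide
          rw [hlen, slice_toList, hdrop 8 (by rw [← h2]; decide)]
          simp
        · have n2 : PySem.Str.startswith s "builder-" = false := by
            rw [swstr "builder-" "builder" (by decide) (by decide)]
            exact beq_eq_false_iff_ne.mpr h2
          by_cases h3 : "reviewer".toList = h
          · have t3 : PySem.Str.startswith s "reviewer-" = true := by
              rw [swstr "reviewer-" "reviewer" (by decide) (by decide)]; simp [h3]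
            have hb : (h == "scout".toList || h == "builder".toList || h == "reviewer".toList) = true := by
              simp [← h3]
            simp only [nolead, Bool.false_eq_true, if_false, leadLoopA, n1, n2, t3, if_true, hb,
              Bool.true_and]
            apply string_ext
            simp only [String.toList_append]
            have hlen : PySem.Str.len "reviewer-" = ((9 : Nat) : Int) := by decide
            rw [hlen, slice_toList, hdrop 9 (by rw [← h3]; decide)]
            simp
          · have n3 : PySem.Str.startswith s "reviewer-" = false := by
              rw [swstr "reviewer-" "reviewer" (by decide) (by decide)]
              exact beq_eq_false_iff_ne.mpr h3
            have hb : (h == "scout".toList || h == "builder".toList || h == "reviewer".toList) = false := by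
              simp only [Bool.or_eq_false_iff, beq_eq_false_iff_ne]
              exact ⟨⟨Ne.symm h1, Ne.symm h2⟩, Ne.symm h3⟩
            simp only [nolead, Bool.false_eq_true, if_false, leadLoopA, n1, n2, n3, hb]
            simp
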